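-- pv_equiv track=rewrite | github.com/flashlin/Samples | openSource/qmd/finetune/jobs/eval.py | parse_expansion
-- ===== SOURCE A (Python) =====
-- def parse_expansion(text):
--     result = {"lex": [], "vec": [], "hyde": [], "invalid": []}
--     for line in text.strip().split("\n"):
--         line = line.strip()
--         if not line:
--             continue
--         if line.startswith("lex:"):
--             result["lex"].append(line[4:].strip())
--         elif line.startswith("vec:"):
--             result["vec"].append(line[4:].strip())
--         elif line.startswith("hyde:"):
--             result["hyde"].append(line[5:].strip())
--         else:
--             result["invalid"].append(line)
--     return result
-- ===== SOURCE B (Python) =====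
-- def parse_expansion(text):
--     prefixes = (("lex", "lex:"), ("vec", "vec:"), ("hyde", "hyde:"))
--
--     def classify(line):
--         for key, p in prefixes:
--             if line.startswith(p):
--                 return key, line[len(p):].strip()
--         return "invalid", line
--
--     tagged = []
--     for raw in text.strip().split("\n"):
--         line = raw.strip()
--         if line:
--             tagged.append(classify(line))
--     return {k: [v for t, v in tagged if t == k]
--             for k in ("lex", "vec", "hyde", "invalid")}
-- ===== Notes on version B (the rewrite author's own statement) =====
-- stated objective: alternative
-- what changed: A's single if/elif dispatch loop mutating a four-bucket dict is replaced by a table-driven classifier (prefix/offset data table, no branch chain) producing a tagged (key, payload) stream in one pass, which a separate group-by-key stage turns into the buckets.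
import Mathlib
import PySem

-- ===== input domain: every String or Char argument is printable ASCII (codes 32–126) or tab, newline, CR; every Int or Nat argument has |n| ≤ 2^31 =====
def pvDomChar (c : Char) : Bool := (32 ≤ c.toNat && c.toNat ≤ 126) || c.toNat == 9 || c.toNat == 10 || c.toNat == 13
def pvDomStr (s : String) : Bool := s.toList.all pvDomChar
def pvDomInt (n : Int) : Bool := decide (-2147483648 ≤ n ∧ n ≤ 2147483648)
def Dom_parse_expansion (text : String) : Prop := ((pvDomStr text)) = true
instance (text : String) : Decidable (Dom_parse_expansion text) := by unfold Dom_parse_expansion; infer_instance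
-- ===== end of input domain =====

-- B replaces A's if/elif dispatch loop over a mutated dict by a table-driven classifier producing a
-- tagged (key, payload) stream, grouped into the buckets by a separate pass (objective: alternative).

-- ===== PORT A =====
-- one loop iteration of A: strip the line, skip empties, dispatch on the prefix, append into the dict
def pvStepA (d : PySem.Dict String (List String)) (line0 : String) : PySem.Dict String (List String) :=
  let line := PySem.Str.strip line0
  if line = "" then d
  else if PySem.Str.startswith line "lex:" then
    d.modify "lex" [] (· ++ [PySem.Str.strip (PySem.Str.slice line (some 4) none)])
  else if PySem.Str.startswith line "vec:" then
    d.modify "vec" [] (· ++ [PySem.Str.strip (PySem.Str.slice line (some 4) none)])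
  else if PySem.Str.startswith line "hyde:" then
    d.modify "hyde" [] (· ++ [PySem.Str.strip (PySem.Str.slice line (some 5) none)])
  else d.modify "invalid" [] (· ++ [line])

-- split? returns none only for an empty separator, so .getD [] is exact for sep = "\n"
def parse_expansion (text : String) : List (String × List String) :=
  (((PySem.Str.split? (PySem.Str.strip text) "\n").getD []).foldl pvStepA
    (PySem.Dict.ofList [("lex", []), ("vec", []), ("hyde", []), ("invalid", [])])).items

-- ===== PORT B =====
-- Source B's prefix table: (bucket key, prefix); the payload offset is len(prefix)
def pvPrefixes : List (String × String) := [("lex", "lex:"), ("vec", "vec:"), ("hyde", "hyde:")]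

-- Source B's classify: first table entry whose prefix matches (the for/return loop = find?), else invalid
def pvClassify (line : String) : String × String :=
  match pvPrefixes.find? (fun kp => PySem.Str.startswith line kp.2) with
  | some (k, p) => (k, PySem.Str.strip (PySem.Str.slice line (some (PySem.Str.len p : Int)) none))
  | none => ("invalid", line)

def parse_expansion_alt (text : String) : List (String × List String) :=
  let tagged := ((PySem.Str.split? (PySem.Str.strip text) "\n").getD []).foldl
    (fun acc raw =>
      let line := PySem.Str.strip raw
      if line = "" then acc else acc ++ [pvClassify line]) []
  ["lex", "vec", "hyde", "invalid"].map
    (fun k => (k, (tagged.filter (fun p => p.1 == k)).map (·.2)))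

-- ===== PRECONDITION & SPEC =====
def Spec_parse_expansion (text : String) (out : List (String × List String)) : Prop := out = parse_expansion_alt text
instance (text : String) (out : List (String × List String)) : Decidable (Spec_parse_expansion text out) := by unfold Spec_parse_expansion; infer_instance

-- ===== CLAIM (what is proved, stated in full; the proofs are below) =====
def Claim_equal_parse_expansion : Prop := ∀ (text : String), Dom_parse_expansion text → Spec_parse_expansion text (parse_expansion text)

-- ===== LEMMAS AND PROOFS =====

-- two startswith tests with different first characters cannot both hold
lemma pv_sw_head_ne {cs : List Char} {a b : Char} {p q : List Char} (hab : a ≠ b)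
    (h : PySem.Chars.startswith cs (a :: p) = true) : PySem.Chars.startswith cs (b :: q) = false := by
  by_contra hc
  rw [Bool.not_eq_false, PySem.Chars.startswith_iff] at hc
  rw [PySem.Chars.startswith_iff] at h
  obtain ⟨t1, h1⟩ := h
  obtain ⟨t2, h2⟩ := hc
  rw [← h1] at h2
  simp at h2
  exact hab (h2.1.symm)

-- A's buckets, as filter/map functions of the cleaned line list
def pvLex (C : List String) : List String :=
  (C.filter (fun l => PySem.Str.startswith l "lex:")).map
      (fun l => PySem.Str.strip (PySem.Str.slice l (some 4) none))
def pvVec (C : List String) : List String :=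
  (C.filter (fun l => PySem.Str.startswith l "vec:")).map
      (fun l => PySem.Str.strip (PySem.Str.slice l (some 4) none))
def pvHyde (C : List String) : List String :=
  (C.filter (fun l => PySem.Str.startswith l "hyde:")).map
      (fun l => PySem.Str.strip (PySem.Str.slice l (some 5) none))
def pvInv (C : List String) : List String :=
  C.filter (fun l => !(PySem.Str.startswith l "lex:" ||
      PySem.Str.startswith l "vec:" || PySem.Str.startswith l "hyde:"))
def pvClean (L : List String) : List String :=
  (L.filter (fun l => !(PySem.Str.strip l == ""))).map PySem.Str.strip

-- the loop invariant: A's fold over any suffix appends exactly the four filter/map buckets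
lemma pv_fold_items (L : List String) : ∀ (a b c d : List String),
    (L.foldl pvStepA (PySem.Dict.mk [("lex",a),("vec",b),("hyde",c),("invalid",d)])).items
    = [("lex", a ++ pvLex (pvClean L)), ("vec", b ++ pvVec (pvClean L)),
       ("hyde", c ++ pvHyde (pvClean L)), ("invalid", d ++ pvInv (pvClean L))] := by
  induction L with
  | nil => intro a b c d; simp [pvLex, pvVec, pvHyde, pvInv, pvClean]
  | cons s tl ih =>
    intro a b c d
    by_cases h0 : PySem.Str.strip s = ""
    · have hstep : pvStepA (PySem.Dict.mk [("lex",a),("vec",b),("hyde",c),("invalid",d)]) s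
          = PySem.Dict.mk [("lex",a),("vec",b),("hyde",c),("invalid",d)] := by
        simp [pvStepA, h0]
      have hclean : pvClean (s :: tl) = pvClean tl := by simp [pvClean, h0]
      simp only [List.foldl_cons, hstep, hclean, ih]
    · have hclean : pvClean (s :: tl) = PySem.Str.strip s :: pvClean tl := by
        simp [pvClean, h0]
      by_cases h1 : PySem.Str.startswith (PySem.Str.strip s) "lex:" = true
      · have h1' := h1; simp at h1'
        have hv : PySem.Chars.startswith (PySem.Chars.strip s.toList) ['v', 'e', 'c', ':'] = false :=
          pv_sw_head_ne (by decide) h1'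
        have hh : PySem.Chars.startswith (PySem.Chars.strip s.toList) ['h', 'y', 'd', 'e', ':'] = false :=
          pv_sw_head_ne (by decide) h1'
        simp only [List.foldl_cons]
        have hstep : pvStepA (PySem.Dict.mk [("lex",a),("vec",b),("hyde",c),("invalid",d)]) s
            = PySem.Dict.mk [("lex",a ++ [PySem.Str.strip (PySem.Str.slice (PySem.Str.strip s) (some 4) none)]),
                ("vec",b),("hyde",c),("invalid",d)] := by
          simp [pvStepA, h0, h1', PySem.Dict.modify, PySem.Dict.insert, PySem.Dict.getD,
            PySem.Dict.get?, PySem.Dict.contains]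
        rw [hstep, ih, hclean]
        simp [pvLex, pvVec, pvHyde, pvInv, h1', hv, hh]
      · have h1' := h1; simp at h1'
        by_cases h2 : PySem.Str.startswith (PySem.Str.strip s) "vec:" = true
        · have h2' := h2; simp at h2'
          have hh : PySem.Chars.startswith (PySem.Chars.strip s.toList) ['h', 'y', 'd', 'e', ':'] = false :=
            pv_sw_head_ne (by decide) h2'
          simp only [List.foldl_cons]
          have hstep : pvStepA (PySem.Dict.mk [("lex",a),("vec",b),("hyde",c),("invalid",d)]) s
              = PySem.Dict.mk [("lex",a),
                  ("vec",b ++ [PySem.Str.strip (PySem.Str.slice (PySem.Str.strip s) (some 4) none)]),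
                  ("hyde",c),("invalid",d)] := by
            simp [pvStepA, h0, h1', h2', PySem.Dict.modify, PySem.Dict.insert, PySem.Dict.getD,
              PySem.Dict.get?, PySem.Dict.contains]
          rw [hstep, ih, hclean]
          simp [pvLex, pvVec, pvHyde, pvInv, h1', h2', hh]
        · have h2' := h2; simp at h2'
          by_cases h3 : PySem.Str.startswith (PySem.Str.strip s) "hyde:" = true
          · have h3' := h3; simp at h3'
            simp only [List.foldl_cons]
            have hstep : pvStepA (PySem.Dict.mk [("lex",a),("vec",b),("hyde",c),("invalid",d)]) s
                = PySem.Dict.mk [("lex",a),("vec",b),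
                    ("hyde",c ++ [PySem.Str.strip (PySem.Str.slice (PySem.Str.strip s) (some 5) none)]),
                    ("invalid",d)] := by
              simp [pvStepA, h0, h1', h2', h3', PySem.Dict.modify, PySem.Dict.insert, PySem.Dict.getD,
                PySem.Dict.get?, PySem.Dict.contains]
            rw [hstep, ih, hclean]
            simp [pvLex, pvVec, pvHyde, pvInv, h1', h2', h3']
          · have h3' := h3; simp at h3'
            simp only [List.foldl_cons]
            have hstep : pvStepA (PySem.Dict.mk [("lex",a),("vec",b),("hyde",c),("invalid",d)]) s
                = PySem.Dict.mk [("lex",a),("vec",b),("hyde",c),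
                    ("invalid",d ++ [PySem.Str.strip s])] := by
              simp [pvStepA, h0, h1', h2', h3', PySem.Dict.modify, PySem.Dict.insert, PySem.Dict.getD,
                PySem.Dict.get?, PySem.Dict.contains]
            rw [hstep, ih, hclean]
            simp [pvLex, pvVec, pvHyde, pvInv, h1', h2', h3']

-- B's tagging fold over the raw lines is the cleaned line list mapped through the classifier
lemma pv_tagged (L : List String) : ∀ (acc : List (String × String)),
    (L.foldl (fun acc raw =>
        let line := PySem.Str.strip raw
        if line = "" then acc else acc ++ [pvClassify line]) acc)
    = acc ++ (pvClean L).map pvClassify := by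
  induction L with
  | nil => intro acc; simp [pvClean]
  | cons s tl ih =>
    intro acc
    by_cases h0 : PySem.Str.strip s = ""
    · have hclean : pvClean (s :: tl) = pvClean tl := by simp [pvClean, h0]
      simp [h0, hclean, ih]
    · have hclean : pvClean (s :: tl) = PySem.Str.strip s :: pvClean tl := by
        simp [pvClean, h0]
      simp only [List.foldl_cons, if_neg h0, ih, hclean, List.map_cons]
      simp
  
-- grouping the classified stream by each key recovers the four filter/map buckets
lemma pv_groups (C : List String) :
    ((C.map pvClassify).filter (fun p => p.1 == "lex")).map (·.2) = pvLex C ∧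
    ((C.map pvClassify).filter (fun p => p.1 == "vec")).map (·.2) = pvVec C ∧
    ((C.map pvClassify).filter (fun p => p.1 == "hyde")).map (·.2) = pvHyde C ∧
    ((C.map pvClassify).filter (fun p => p.1 == "invalid")).map (·.2) = pvInv C := by
  induction C with
  | nil => simp [pvLex, pvVec, pvHyde, pvInv]
  | cons l tl ih =>
    obtain ⟨i1, i2, i3, i4⟩ := ih
    by_cases h1 : PySem.Str.startswith l "lex:" = true
    · have h1' := h1; simp at h1'
      have hv : PySem.Chars.startswith l.toList ['v', 'e', 'c', ':'] = false :=
        pv_sw_head_ne (by decide) h1'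
      have hh : PySem.Chars.startswith l.toList ['h', 'y', 'd', 'e', ':'] = false :=
        pv_sw_head_ne (by decide) h1'
      have hc : pvClassify l = ("lex", PySem.Str.strip (PySem.Str.slice l (some 4) none)) := by
        simp [pvClassify, pvPrefixes, h1']
      refine ⟨?_, ?_, ?_, ?_⟩ <;>
        simp [hc, i1, i2, i3, i4, pvLex, pvVec, pvHyde, pvInv, h1', hv, hh]
    · have h1' := h1; simp at h1'
      by_cases h2 : PySem.Str.startswith l "vec:" = true
      · have h2' := h2; simp at h2'
        have hh : PySem.Chars.startswith l.toList ['h', 'y', 'd', 'e', ':'] = false :=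
          pv_sw_head_ne (by decide) h2'
        have hc : pvClassify l = ("vec", PySem.Str.strip (PySem.Str.slice l (some 4) none)) := by
          simp [pvClassify, pvPrefixes, List.find?, h1', h2']
        refine ⟨?_, ?_, ?_, ?_⟩ <;>
          simp [hc, i1, i2, i3, i4, pvLex, pvVec, pvHyde, pvInv, h1', h2', hh]
      · have h2' := h2; simp at h2'
        by_cases h3 : PySem.Str.startswith l "hyde:" = true
        · have h3' := h3; simp at h3'
          have hc : pvClassify l = ("hyde", PySem.Str.strip (PySem.Str.slice l (some 5) none)) := by
            simp [pvClassify, pvPrefixes, List.find?, h1', h2', h3']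
          refine ⟨?_, ?_, ?_, ?_⟩ <;>
            simp [hc, i1, i2, i3, i4, pvLex, pvVec, pvHyde, pvInv, h1', h2', h3']
        · have h3' := h3; simp at h3'
          have hc : pvClassify l = ("invalid", l) := by
            simp [pvClassify, pvPrefixes, List.find?, h1', h2', h3']
          refine ⟨?_, ?_, ?_, ?_⟩ <;>
            simp [hc, i1, i2, i3, i4, pvLex, pvVec, pvHyde, pvInv, h1', h2', h3']

-- ===== VERDICT (by name: the statement is the Claim_ definition above) =====
theorem parse_expansion_spec : Claim_equal_parse_expansion := by
  intro text _
  unfold Spec_parse_expansion parse_expansion parse_expansion_alt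
  have hinit : PySem.Dict.ofList ([("lex", []), ("vec", []), ("hyde", []), ("invalid", [])] : List (String × List String))
      = PySem.Dict.mk [("lex",[]),("vec",[]),("hyde",[]),("invalid",[])] := by rfl
  set L := (PySem.Str.split? (PySem.Str.strip text) "\n").getD [] with hL
  obtain ⟨g1, g2, g3, g4⟩ := pv_groups (pvClean L)
  rw [hinit, pv_fold_items]
  simp only [pv_tagged L [], List.nil_append, List.map_cons, List.map_nil]
  rw [g1, g2, g3, g4]
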